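-- pv_equiv track=rewrite | github.com/PLeVasseur/opencode-project-agents | fls/reports/validate-ledger-and-checklist-v3.py | split_entry_chunks
-- ===== SOURCE A (Python) =====
-- def split_entry_chunks(lines: list[str]) -> list[str]:
--     chunks: list[str] = []
--     current: list[str] = []
--     for line in lines:
--         stripped = line.strip()
--         if not stripped:
--             if current:
--                 chunks.append(" ".join(current))
--                 current = []
--             continue
--         if stripped.startswith(".. "):
--             continue
--         if stripped.startswith(":dp:`"):
--             continue
--         current.append(stripped)
--     if current:
--         chunks.append(" ".join(current))
--     return chunks
-- ===== SOURCE B (Python) =====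
-- def split_entry_chunks(lines: list[str]) -> list[str]:
--     def keep(s: str) -> bool:
--         return not (s.startswith(".. ") or s.startswith(":dp:`"))
--
--     def groups(ss: list[str]) -> list[list[str]]:
--         # split into maximal runs of non-empty strings
--         if not ss:
--             return []
--         if not ss[0]:
--             return groups(ss[1:])
--         k = 0
--         while k < len(ss) and ss[k]:
--             k += 1
--         return [ss[:k]] + groups(ss[k:])
--
--     stripped = [line.strip() for line in lines]
--     out: list[str] = []
--     for g in groups(stripped):
--         kept = [s for s in g if keep(s)]
--         if kept:
--             out.append(" ".join(kept))
--     return out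
-- ===== Notes on version B (the rewrite author's own statement) =====
-- stated objective: idiomatic
-- what changed: B first partitions the stripped lines into maximal non-blank runs and then maps filter+join over the runs, instead of A's single stateful loop carrying a 'current' accumulator that is flushed on blanks.
import Mathlib
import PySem

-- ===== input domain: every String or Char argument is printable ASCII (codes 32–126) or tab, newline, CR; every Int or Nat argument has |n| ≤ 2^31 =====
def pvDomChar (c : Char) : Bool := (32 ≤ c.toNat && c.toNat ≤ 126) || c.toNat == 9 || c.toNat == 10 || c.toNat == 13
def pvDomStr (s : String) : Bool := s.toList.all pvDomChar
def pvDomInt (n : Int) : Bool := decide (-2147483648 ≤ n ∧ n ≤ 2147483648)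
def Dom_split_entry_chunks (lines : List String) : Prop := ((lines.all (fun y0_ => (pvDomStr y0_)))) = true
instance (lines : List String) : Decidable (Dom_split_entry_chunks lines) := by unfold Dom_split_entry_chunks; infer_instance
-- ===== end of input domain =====

-- B partitions the stripped lines into maximal non-blank runs and maps filter+join over the
-- runs, instead of A's single stateful loop with a flushed 'current' accumulator (idiomatic).


-- ===== PORT A =====
def split_entry_chunks (lines : List String) : List String :=
  let st := lines.foldl (fun (acc : List String × List String) line =>
    let stripped := PySem.Str.strip line
    if stripped = "" then
      if acc.2 = [] then acc else (acc.1 ++ [PySem.Str.join " " acc.2], [])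
    else if PySem.Str.startswith stripped ".. " then acc
    else if PySem.Str.startswith stripped ":dp:`" then acc
    else (acc.1, acc.2 ++ [stripped])) ([], [])
  if st.2 = [] then st.1 else st.1 ++ [PySem.Str.join " " st.2]

-- ===== PORT B =====
def pvKeep (s : String) : Bool :=
  !(PySem.Str.startswith s ".. " || PySem.Str.startswith s ":dp:`")

def pvNonblank (t : String) : Bool := !(t == "")

-- maximal runs of non-empty strings (Source B's `groups`)
def pvGroups : List String → List (List String)
  | [] => []
  | s :: rest =>
    if h : s = "" then pvGroups rest
    else ((s :: rest).takeWhile pvNonblank) :: pvGroups ((s :: rest).dropWhile pvNonblank)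
termination_by ss => ss.length
decreasing_by
  · simp
  · have hb : (s == "") = false := beq_eq_false_iff_ne.mpr h
    have h2 := List.length_dropWhile_le (p := pvNonblank) (l := rest)
    simp [List.dropWhile, pvNonblank, hb]
    omega

def split_entry_chunks_alt (lines : List String) : List String :=
  let stripped := lines.map PySem.Str.strip
  (pvGroups stripped).foldl (fun out g =>
    let kept := g.filter pvKeep
    if kept = [] then out else out ++ [PySem.Str.join " " kept]) []

-- ===== PRECONDITION & SPEC =====
def Spec_split_entry_chunks (lines : List String) (out : List String) : Prop := out = split_entry_chunks_alt lines
instance (lines : List String) (out : List String) : Decidable (Spec_split_entry_chunks lines out) := by unfold Spec_split_entry_chunks; infer_instance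

-- ===== CLAIM (what is proved, stated in full; the proofs are below) =====
def Claim_equal_split_entry_chunks : Prop := ∀ (lines : List String), Dom_split_entry_chunks lines → Spec_split_entry_chunks lines (split_entry_chunks lines)

-- ===== LEMMAS AND PROOFS =====

-- A's loop body on an already-stripped string
def pvStepS (acc : List String × List String) (stripped : String) : List String × List String :=
  if stripped = "" then
    if acc.2 = [] then acc else (acc.1 ++ [PySem.Str.join " " acc.2], [])
  else if PySem.Str.startswith stripped ".. " then acc
  else if PySem.Str.startswith stripped ":dp:`" then acc
  else (acc.1, acc.2 ++ [stripped])

def pvFinish (st : List String × List String) : List String :=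
  if st.2 = [] then st.1 else st.1 ++ [PySem.Str.join " " st.2]

def pvEmit (out : List String) (g : List String) : List String :=
  if g.filter pvKeep = [] then out else out ++ [PySem.Str.join " " (g.filter pvKeep)]

theorem pvStepS_nonblank (s : String) (hs : s ≠ "") (acc : List String × List String) :
    pvStepS acc s = if pvKeep s then (acc.1, acc.2 ++ [s]) else acc := by
  unfold pvStepS pvKeep
  cases h1 : PySem.Str.startswith s ".. " <;>
    cases h2 : PySem.Str.startswith s ":dp:`" <;>
      simp_all

theorem pvRunLemma (g : List String) (hg : ∀ s ∈ g, s ≠ "") :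
    ∀ chunks cur, List.foldl pvStepS (chunks, cur) g = (chunks, cur ++ g.filter pvKeep) := by
  induction g with
  | nil => intro chunks cur; simp
  | cons s g ih =>
    intro chunks cur
    have hs : s ≠ "" := hg s (by simp)
    have hg' : ∀ t ∈ g, t ≠ "" := fun t ht => hg t (by simp [ht])
    rw [List.foldl_cons, pvStepS_nonblank s hs]
    by_cases hk : pvKeep s = true
    · simp [hk, ih hg']
    · simp [hk, ih hg']

theorem pvStepS_blank (chunks cur : List String) :
    pvStepS (chunks, cur) "" = (if cur = [] then chunks else chunks ++ [PySem.Str.join " " cur], []) := by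
  unfold pvStepS
  split_ifs <;> simp_all

theorem pvMainLemma : ∀ ss chunks,
    pvFinish (List.foldl pvStepS (chunks, []) ss) = (pvGroups ss).foldl pvEmit chunks := by
  intro ss
  induction ss using pvGroups.induct with
  | case1 => intro chunks; simp [pvGroups, pvFinish]
  | case2 rest ih =>
    intro chunks
    simp only [pvGroups, List.foldl_cons, pvStepS_blank]
    simpa using ih chunks
  | case3 s rest h ih =>
    intro chunks
    have hrun : ∀ t ∈ (s :: rest).takeWhile pvNonblank, t ≠ "" := by
      intro t ht
      simpa [pvNonblank] using List.mem_takeWhile_imp ht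
    have hsplit : (s :: rest).takeWhile pvNonblank ++ (s :: rest).dropWhile pvNonblank = s :: rest :=
      List.takeWhile_append_dropWhile
    have hfold : List.foldl pvStepS (chunks, []) (s :: rest)
        = List.foldl pvStepS (chunks, ((s :: rest).takeWhile pvNonblank).filter pvKeep)
            ((s :: rest).dropWhile pvNonblank) := by
      conv_lhs => rw [← hsplit]
      rw [List.foldl_append, pvRunLemma _ hrun]
      simp
    rw [pvGroups]
    simp only [h, dite_false, List.foldl_cons, hfold]
    rcases htail : (s :: rest).dropWhile pvNonblank with _ | ⟨t, ts⟩
    · simp [pvFinish, pvEmit, pvGroups]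
    · have h0 := List.head?_dropWhile_not pvNonblank (s :: rest)
      rw [htail] at h0
      simp [pvNonblank] at h0
      subst h0
      rw [htail] at ih
      rw [List.foldl_cons, pvStepS_blank]
      have hstep : (if ((s :: rest).takeWhile pvNonblank).filter pvKeep = []
            then chunks else chunks ++ [PySem.Str.join " " (((s :: rest).takeWhile pvNonblank).filter pvKeep)])
          = pvEmit chunks ((s :: rest).takeWhile pvNonblank) := by
        unfold pvEmit; split_ifs <;> simp_all
      rw [hstep]
      have hI := ih (pvEmit chunks ((s :: rest).takeWhile pvNonblank))
      rw [List.foldl_cons, pvStepS_blank] at hI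
      simpa using hI

theorem split_entry_chunks_spec : Claim_equal_split_entry_chunks := by
  intro lines _
  unfold Spec_split_entry_chunks split_entry_chunks split_entry_chunks_alt
  have : lines.foldl (fun (acc : List String × List String) line =>
      let stripped := PySem.Str.strip line
      if stripped = "" then
        if acc.2 = [] then acc else (acc.1 ++ [PySem.Str.join " " acc.2], [])
      else if PySem.Str.startswith stripped ".. " then acc
      else if PySem.Str.startswith stripped ":dp:`" then acc
      else (acc.1, acc.2 ++ [stripped])) ([], [])
      = List.foldl pvStepS ([], []) (lines.map PySem.Str.strip) := by
    rw [List.foldl_map]; rfl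
  rw [this]
  exact pvMainLemma (lines.map PySem.Str.strip) []
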